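-- pv_equiv track=rewrite | github.com/Bocchiid/WZU-Python-Programming-25fa | Experiment_07/7.3 股票分析(project)/涨幅与最高价.py | high_and_uplift
-- ===== SOURCE A (Python) =====
-- def high_and_uplift(top_uplift, top_high):
--     """
--     @参数 top_high，最高价在前10名的股票代码，字符串
--     @参数 top_uplift，涨幅在前10名的股票代码，字符串
--     返回一个列表，其元素依序为以下4个：
--     涨幅和最高价均在前10名的股票代码,按股票代码升序，列表
--     涨幅或最高价在前10名的股票代码,按股票代码升序，列表
--     涨幅前10名，但最高价未进前10名的股票代码,按股票代码升序，列表
--     涨幅和最高价不同时在前10名的股票,按股票代码升序，列表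
--     票代码。
--     """
--     # 补充你的代码
--     u_set = set(top_uplift)
--     h_set = set(top_high)
--
--     u_and_v_0 = u_set & h_set
--     u_and_v_1 = u_set | h_set
--     u_and_v_2 = u_set - h_set
--     u_and_v_3 = u_set ^ h_set
--
--     ls_0 = [x for x in u_and_v_0]
--     ls_0.sort()
--     ls_1 = [x for x in u_and_v_1]
--     ls_1.sort()
--     ls_2 = [x for x in u_and_v_2]
--     ls_2.sort()
--     ls_3 = [x for x in u_and_v_3]
--     ls_3.sort()
--
--     return [ls_0, ls_1, ls_2, ls_3]
-- ===== SOURCE B (Python) =====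
-- def high_and_uplift(top_uplift, top_high):
--     u_set = set(top_uplift)
--     h_set = set(top_high)
--     inter, union, diff, sym = [], [], [], []
--     for c in sorted(u_set | h_set):
--         union.append(c)
--         if c in u_set and c in h_set:
--             inter.append(c)
--         elif c in u_set:
--             diff.append(c)
--             sym.append(c)
--         else:
--             sym.append(c)
--     return [inter, union, diff, sym]
-- ===== Notes on version B (the rewrite author's own statement) =====
-- stated objective: alternative
-- what changed: Instead of computing four set operations and sorting each of the four results, B sorts the union once and classifies each character in a single pass, appending to the four result lists in already-sorted order.
import Mathlib
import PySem

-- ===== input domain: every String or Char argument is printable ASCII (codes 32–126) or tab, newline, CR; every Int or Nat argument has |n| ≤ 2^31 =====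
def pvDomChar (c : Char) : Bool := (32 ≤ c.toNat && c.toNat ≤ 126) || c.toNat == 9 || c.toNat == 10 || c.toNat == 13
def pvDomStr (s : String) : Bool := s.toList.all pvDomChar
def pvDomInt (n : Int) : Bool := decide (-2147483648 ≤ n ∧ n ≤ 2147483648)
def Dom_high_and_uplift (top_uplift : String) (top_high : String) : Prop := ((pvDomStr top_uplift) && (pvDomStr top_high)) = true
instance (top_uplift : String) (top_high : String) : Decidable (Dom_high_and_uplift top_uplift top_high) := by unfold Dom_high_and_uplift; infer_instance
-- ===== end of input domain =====

-- B classifies each character of the one sorted union in a single pass instead of sorting four separate set operations; same return value.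
-- Exactness note: Python's lists hold 1-character strings; sorting those lexicographically equals sorting the
-- underlying characters, so both ports sort the Chars and map each to its 1-character String at the end.

-- a Python 1-character string
def pvStr (c : Char) : String := String.ofList [c]

-- B's loop body: classify one character of the sorted union into the four accumulators
def pvStep (u_set h_set : PySem.Set Char)
    (s : List Char × List Char × List Char × List Char) (c : Char) :
    List Char × List Char × List Char × List Char :=
  let un := s.2.1 ++ [c]
  if PySem.Set.contains u_set c && PySem.Set.contains h_set c then
    (s.1 ++ [c], un, s.2.2.1, s.2.2.2)
  else if PySem.Set.contains u_set c then
    (s.1, un, s.2.2.1 ++ [c], s.2.2.2 ++ [c])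
  else
    (s.1, un, s.2.2.1, s.2.2.2 ++ [c])

-- ===== PORT A =====
def high_and_uplift (top_uplift : String) (top_high : String) : List (List String) :=
  let u_set : PySem.Set Char := PySem.Set.ofList top_uplift.toList
  let h_set : PySem.Set Char := PySem.Set.ofList top_high.toList
  let ls0 := (PySem.List.sorted (PySem.Set.inter u_set h_set) (fun x => x) false).map pvStr
  let ls1 := (PySem.List.sorted (PySem.Set.union u_set h_set) (fun x => x) false).map pvStr
  let ls2 := (PySem.List.sorted (PySem.Set.diff u_set h_set) (fun x => x) false).map pvStr
  let ls3 := (PySem.List.sorted (PySem.Set.symmDiff u_set h_set) (fun x => x) false).map pvStr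
  [ls0, ls1, ls2, ls3]

-- ===== PORT B =====
def high_and_uplift_alt (top_uplift : String) (top_high : String) : List (List String) :=
  let u_set : PySem.Set Char := PySem.Set.ofList top_uplift.toList
  let h_set : PySem.Set Char := PySem.Set.ofList top_high.toList
  let r := (PySem.List.sorted (PySem.Set.union u_set h_set) (fun x => x) false).foldl
    (pvStep u_set h_set) ([], [], [], [])
  [r.1.map pvStr, r.2.1.map pvStr, r.2.2.1.map pvStr, r.2.2.2.map pvStr]

-- ===== PRECONDITION & SPEC =====
def Spec_high_and_uplift (top_uplift : String) (top_high : String) (out : List (List String)) : Prop := out = high_and_uplift_alt top_uplift top_high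
instance (top_uplift : String) (top_high : String) (out : List (List String)) : Decidable (Spec_high_and_uplift top_uplift top_high out) := by unfold Spec_high_and_uplift; infer_instance

-- ===== CLAIM (what is proved, stated in full; the proofs are below) =====
def Claim_equal_high_and_uplift : Prop := ∀ (top_uplift : String) (top_high : String), Dom_high_and_uplift top_uplift top_high → Spec_high_and_uplift top_uplift top_high (high_and_uplift top_uplift top_high)

-- ===== LEMMAS AND PROOFS =====

-- B's fold appends each component in order: the four accumulators are filters of the traversed list
theorem pv_fold_spec (u h : PySem.Set Char) (l : List Char)
    (i un d sy : List Char) :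
    l.foldl (pvStep u h) (i, un, d, sy)
    = (i ++ l.filter (fun c => PySem.Set.contains u c && PySem.Set.contains h c),
       un ++ l,
       d ++ l.filter (fun c => PySem.Set.contains u c && !PySem.Set.contains h c),
       sy ++ l.filter (fun c => !(PySem.Set.contains u c && PySem.Set.contains h c))) := by
  induction l generalizing i un d sy with
  | nil => simp
  | cons c t ih =>
    simp only [List.foldl_cons]
    by_cases hu : c ∈ u <;> by_cases hh : c ∈ h
    · rw [show pvStep u h (i, un, d, sy) c = (i ++ [c], un ++ [c], d, sy) from by
        simp [pvStep, hu, hh], ih]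
      simp [hu, hh]
    · rw [show pvStep u h (i, un, d, sy) c = (i, un ++ [c], d ++ [c], sy ++ [c]) from by
        simp [pvStep, hu, hh], ih]
      simp [hu, hh]
    · rw [show pvStep u h (i, un, d, sy) c = (i, un ++ [c], d, sy ++ [c]) from by
        simp [pvStep, hu, hh], ih]
      simp [hu, hh]
    · rw [show pvStep u h (i, un, d, sy) c = (i, un ++ [c], d, sy ++ [c]) from by
        simp [pvStep, hu, hh], ih]
      simp [hu, hh]

-- sorted of a nodup set equals the matching filter of the sorted union
theorem pv_sorted_eq_filter (base op : List Char) (p : Char → Bool)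
    (hbase : base.Nodup) (hop : op.Nodup)
    (hmem : ∀ x, x ∈ op ↔ x ∈ base ∧ p x = true) :
    PySem.List.sorted op (fun x => x) false
      = (PySem.List.sorted base (fun x => x) false).filter p := by
  set order := PySem.List.sorted base (fun x => x) false with horder
  have hperm_order : order.Perm base := PySem.List.sorted_perm base (fun x => x) false
  have hnodup_order : order.Nodup := hperm_order.nodup_iff.mpr hbase
  have hle : order.Pairwise (fun a b => a ≤ b) := by
    simpa using PySem.List.sorted_pairwise base (fun x => x)
  have hlt : order.Pairwise (fun a b => a < b) :=
    (hle.and hnodup_order).imp (fun hab => lt_of_le_of_ne hab.1 hab.2)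
  apply PySem.List.sorted_eq_of_perm_of_pairwise_lt
  · refine (List.perm_ext_iff_of_nodup (hnodup_order.filter p) hop).mpr ?_
    intro x
    simp only [List.mem_filter, hperm_order.mem_iff, hmem x]
  · exact hlt.filter p

theorem pv_main (top_uplift top_high : String) :
    high_and_uplift top_uplift top_high = high_and_uplift_alt top_uplift top_high := by
  simp only [high_and_uplift, high_and_uplift_alt]
  rw [pv_fold_spec]
  have hU : (PySem.Set.ofList top_uplift.toList).Nodup := PySem.List.nodup_dedup _
  have hH : (PySem.Set.ofList top_high.toList).Nodup := PySem.List.nodup_dedup _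
  have hbase : (PySem.Set.union (PySem.Set.ofList top_uplift.toList)
      (PySem.Set.ofList top_high.toList)).Nodup := PySem.Set.nodup_union _ _ hU
  have e0 := pv_sorted_eq_filter
    (PySem.Set.union (PySem.Set.ofList top_uplift.toList) (PySem.Set.ofList top_high.toList))
    (PySem.Set.inter (PySem.Set.ofList top_uplift.toList) (PySem.Set.ofList top_high.toList))
    (fun c => PySem.Set.contains (PySem.Set.ofList top_uplift.toList) c &&
              PySem.Set.contains (PySem.Set.ofList top_high.toList) c)
    hbase (PySem.Set.nodup_inter _ _ hU)
    (by intro x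
        simp only [PySem.Set.mem_inter, PySem.Set.mem_union, Bool.and_eq_true,
          PySem.Set.contains_iff]
        tauto)
  have e2 := pv_sorted_eq_filter
    (PySem.Set.union (PySem.Set.ofList top_uplift.toList) (PySem.Set.ofList top_high.toList))
    (PySem.Set.diff (PySem.Set.ofList top_uplift.toList) (PySem.Set.ofList top_high.toList))
    (fun c => PySem.Set.contains (PySem.Set.ofList top_uplift.toList) c &&
              !PySem.Set.contains (PySem.Set.ofList top_high.toList) c)
    hbase (PySem.Set.nodup_diff _ _ hU)
    (by intro x
        simp only [PySem.Set.mem_diff, PySem.Set.mem_union, Bool.and_eq_true,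
          Bool.not_eq_eq_eq_not, Bool.not_true, PySem.Set.contains_iff,
          ← Bool.not_eq_true]
        constructor
        · rintro ⟨h1, h2⟩
          exact ⟨Or.inl h1, h1, by simpa [PySem.Set.contains_iff] using h2⟩
        · rintro ⟨_, h1, h2⟩
          exact ⟨h1, by simpa [PySem.Set.contains_iff] using h2⟩)
  have e3 := pv_sorted_eq_filter
    (PySem.Set.union (PySem.Set.ofList top_uplift.toList) (PySem.Set.ofList top_high.toList))
    (PySem.Set.symmDiff (PySem.Set.ofList top_uplift.toList) (PySem.Set.ofList top_high.toList))
    (fun c => !(PySem.Set.contains (PySem.Set.ofList top_uplift.toList) c &&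
                PySem.Set.contains (PySem.Set.ofList top_high.toList) c))
    hbase (PySem.Set.nodup_symmDiff _ _ hU hH)
    (by intro x
        simp [PySem.Set.mem_symmDiff, PySem.Set.mem_union]
        tauto)
  simp only [e0, e2, e3, List.nil_append]

-- ===== VERDICT (by name: the statement is the Claim_ definition above) =====
theorem high_and_uplift_spec : Claim_equal_high_and_uplift := by
  intro tu th _
  exact pv_main tu th
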